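-- pv_equiv track=rewrite | github.com/timmwagener/helga | helga/maya/import_export/asset_manager/lib/asset_manager_alembic_functionality.py | node_list_to_abc_root_string
-- ===== SOURCE A (Python) =====
-- def node_list_to_abc_root_string(node_name_list):
--     """
--     Convert node name list ['node_name', 'node_name'] to abc root string
--     of this form '-root node_name -root node_name '.
--     Pay attention to the whitespace at the end.
--     """
--
--     #node_list_string
--     node_list_string = ''
--     #iterate
--     for index, node_name in enumerate(node_name_list):
--
--         #first element
--         if not (index):
--
--             #no -root no whitespace at start
--             node_list_string += '{0}'.format(node_name)
--
--             #add whitespace if len of list > 1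
--             if (len(node_name_list) > 1):
--                 node_list_string += ' '
--
--
--         #last element
--         elif (index == len(node_name_list) - 1):
--
--             #no whitespace at end
--             node_list_string += '-root {0}'.format(node_name)
--
--
--         #normal
--         else:
--             #append string (with whitespace at end)
--             node_list_string += '-root {0} '.format(node_name)
--
--     return node_list_string
-- ===== SOURCE B (Python) =====
-- def node_list_to_abc_root_string(node_name_list):
--     if not node_name_list:
--         return ''
--     parts = ['{0}'.format(node_name_list[0])]
--     parts += ['-root {0}'.format(n) for n in node_name_list[1:]]
--     return ' '.join(parts)
-- ===== Notes on version B (the rewrite author's own statement) =====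
-- stated objective: simpler
-- what changed: Replaces A's positional first/last/middle branching inside an index-tracking loop by building the list of parts (head bare, rest '-root '-prefixed) and letting ' '.join place every separator.
import Mathlib
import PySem

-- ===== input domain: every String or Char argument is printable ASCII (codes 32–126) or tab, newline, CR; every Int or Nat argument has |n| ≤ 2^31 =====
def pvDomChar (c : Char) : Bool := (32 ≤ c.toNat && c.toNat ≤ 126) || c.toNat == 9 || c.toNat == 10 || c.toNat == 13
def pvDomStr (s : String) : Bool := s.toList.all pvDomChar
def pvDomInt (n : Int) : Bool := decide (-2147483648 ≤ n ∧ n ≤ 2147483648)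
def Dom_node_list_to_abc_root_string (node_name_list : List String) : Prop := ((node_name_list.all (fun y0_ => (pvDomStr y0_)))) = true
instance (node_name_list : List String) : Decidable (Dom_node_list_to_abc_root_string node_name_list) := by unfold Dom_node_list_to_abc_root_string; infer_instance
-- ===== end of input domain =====

-- B replaces A's index-tracking loop with first/last/middle branches by a join of parts (head bare, rest '-root '-prefixed) — simpler decomposition, same cost.


-- ===== PORT A =====
-- Literal port of A: fold over enumerate(node_name_list) with the first/last/middle branches.
def node_list_to_abc_root_string (node_name_list : List String) : String :=
  (PySem.List.enumerate node_name_list).foldl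
    (fun node_list_string p =>
      if p.1 == 0 then
        -- first element: no -root, then a space iff len > 1
        (if node_name_list.length > 1 then node_list_string ++ p.2 ++ " " else node_list_string ++ p.2)
      else if p.1 == (node_name_list.length : Int) - 1 then
        -- last element: no trailing whitespace
        node_list_string ++ ("-root " ++ p.2)
      else
        -- normal: trailing whitespace
        node_list_string ++ ("-root " ++ p.2 ++ " ")) ""

-- ===== PORT B =====
-- B (simpler): head bare, every later element prefixed '-root ', joined by single spaces.
def node_list_to_abc_root_string_alt (node_name_list : List String) : String :=
  match node_name_list with
  | [] => ""
  | x :: rest => PySem.Str.join " " (x :: rest.map (fun n => "-root " ++ n))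

-- ===== PRECONDITION & SPEC =====
def Spec_node_list_to_abc_root_string (node_name_list : List String) (out : String) : Prop := out = node_list_to_abc_root_string_alt node_name_list
instance (node_name_list : List String) (out : String) : Decidable (Spec_node_list_to_abc_root_string node_name_list out) := by unfold Spec_node_list_to_abc_root_string; infer_instance

-- ===== CLAIM (what is proved, stated in full; the proofs are below) =====
def Claim_equal_node_list_to_abc_root_string : Prop := ∀ (node_name_list : List String), Dom_node_list_to_abc_root_string node_name_list → Spec_node_list_to_abc_root_string node_name_list (node_list_to_abc_root_string node_name_list)

-- ===== LEMMAS AND PROOFS =====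

-- ===== VERDICT (by name: the statement is the Claim_ definition above) =====
-- the tail string: '-root y' pieces separated by spaces, no trailing space
def tailStr : List String → String
  | [] => ""
  | [y] => "-root " ++ y
  | y :: ys@(_ :: _) => "-root " ++ y ++ " " ++ tailStr ys

theorem tail_fold (l : List String) (ys : List String) (s : Int) (acc : String)
    (hs : 0 < s) (hlen : s + ys.length = (l.length : Int)) (hys : ys ≠ []) :
    (PySem.List.enumerate ys s).foldl
      (fun node_list_string p =>
        if p.1 == 0 then
          (if l.length > 1 then node_list_string ++ p.2 ++ " " else node_list_string ++ p.2)
        else if p.1 == (l.length : Int) - 1 then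
          node_list_string ++ ("-root " ++ p.2)
        else
          node_list_string ++ ("-root " ++ p.2 ++ " ")) acc
    = acc ++ tailStr ys := by
  induction ys generalizing s acc with
  | nil => exact absurd rfl hys
  | cons y t ih =>
    rw [PySem.List.enumerate_cons]
    simp only [List.foldl_cons]
    cases t with
    | nil =>
      simp only [List.length_cons, List.length_nil] at hlen
      have h2 : s = (l.length : Int) - 1 := by push_cast at hlen; omega
      simp [tailStr, h2, String.append_assoc, show (l.length : Int) - 1 ≠ 0 by omega]
    | cons y2 t2 =>
      simp only [List.length_cons] at hlen
      push_cast at hlen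
      have h2 : s ≠ (l.length : Int) - 1 := by omega
      rw [ih (s+1) _ (by omega) (by simp only [List.length_cons]; push_cast; omega) (by simp)]
      simp [tailStr, show s ≠ 0 by omega, h2, String.append_assoc]

theorem join_map_tail (ys : List String) (hys : ys ≠ []) :
    PySem.Str.join " " (ys.map (fun n => "-root " ++ n)) = tailStr ys := by
  induction ys with
  | nil => exact absurd rfl hys
  | cons y t ih =>
    cases t with
    | nil =>
      apply String.toList_inj.mp
      simp [tailStr, PySem.Str.toList_join, PySem.Chars.join_singleton]
    | cons y2 t2 =>
      apply String.toList_inj.mp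
      have := congrArg String.toList (ih (by simp))
      simp [tailStr, PySem.Str.toList_join, PySem.Chars.join_cons_cons] at this ⊢
      simp [this]

theorem node_list_to_abc_root_string_spec : Claim_equal_node_list_to_abc_root_string := by
  intro l _
  unfold Spec_node_list_to_abc_root_string node_list_to_abc_root_string node_list_to_abc_root_string_alt
  cases l with
  | nil => rfl
  | cons x rest =>
    rw [PySem.List.enumerate_cons]
    simp only [List.foldl_cons, zero_add]
    cases rest with
    | nil =>
      apply String.toList_inj.mp
      simp [PySem.Str.toList_join, PySem.Chars.join_singleton]
    | cons y t =>
      rw [tail_fold (x :: y :: t) (y :: t) 1 _ (by decide) (by simp; omega) (by simp)]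
      rw [← join_map_tail (y :: t) (by simp)]
      apply String.toList_inj.mp
      simp [PySem.Str.toList_join, PySem.Chars.join_cons_cons, String.append_assoc]
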